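-- pv_equiv track=rewrite | github.com/Hiyuhh/hww1d3_BES | hww1d3.py | vid_search
-- ===== SOURCE A (Python) =====
-- def vid_search(lst, title):
--     lst.sort(key=lambda x: x['title'])
--
--     low = 0
--     high = len(lst) - 1
--     num_checks = 0
--     while low <= high:
--         mid = (low + high) // 2
--         mid_title = lst[mid]['title']
--         num_checks += 1
--         if title == mid_title:
--             return lst[mid]
--         elif title > mid_title:
--             low = mid + 1
--         else:
--             high = mid - 1
--     return None
-- ===== SOURCE B (Python) =====
-- def vid_search(lst, title):
--     lst.sort(key=lambda x: x['title'])
--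
--     def search(lo, n):
--         # binary search over the window of n elements starting at lo
--         if n == 0:
--             return None
--         mid = lo + (n - 1) // 2
--         mid_title = lst[mid]['title']
--         if title == mid_title:
--             return lst[mid]
--         if title > mid_title:
--             return search(mid + 1, lo + n - 1 - mid)
--         return search(lo, mid - lo)
--
--     return search(0, len(lst))
-- ===== Notes on version B (the rewrite author's own statement) =====
-- stated objective: alternative
-- what changed: The imperative while-loop over inclusive bounds (low, high) with a dead num_checks counter is replaced by a recursive helper over an (offset, window-length) pair, probing the same indices in the same order.
import Mathlib
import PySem

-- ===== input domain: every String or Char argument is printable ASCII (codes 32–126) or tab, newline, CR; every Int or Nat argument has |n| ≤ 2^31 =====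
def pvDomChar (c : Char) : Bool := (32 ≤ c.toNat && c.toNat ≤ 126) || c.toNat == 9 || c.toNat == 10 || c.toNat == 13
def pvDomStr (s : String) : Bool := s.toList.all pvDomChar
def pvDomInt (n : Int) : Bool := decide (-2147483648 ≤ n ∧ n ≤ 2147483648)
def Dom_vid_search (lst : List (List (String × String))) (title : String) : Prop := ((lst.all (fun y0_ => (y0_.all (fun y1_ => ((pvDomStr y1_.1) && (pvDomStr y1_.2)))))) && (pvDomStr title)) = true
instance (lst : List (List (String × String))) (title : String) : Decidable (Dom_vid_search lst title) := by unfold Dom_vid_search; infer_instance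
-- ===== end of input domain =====

-- B replaces A's while-loop over inclusive (low, high) bounds (with a dead num_checks
-- counter) by a recursive helper over an (offset, window-length) pair probing the same
-- indices in the same order (objective: alternative).  Both A and B sort `lst` in place
-- (the same sort); the equivalence proved here is about the RETURN value.

-- x['title'] in both Pythons: total here via the "" default; Pre_ guarantees the key is
-- present, where this equals Python's lookup exactly.
def pyTitle (d : List (String × String)) : String := (PySem.Dict.mk d).getD "title" ""

-- ===== PORT A =====
-- the while-loop of A: state (low, high, num_checks)
def vidLoopA (lst : List (List (String × String))) (title : String)
    (low high num_checks : Int) : Option (List (String × String)) :=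
  if h : low ≤ high then
    -- mid = (low + high) // 2, written inline
    match PySem.List.pyGet? lst (PySem.Int.floordiv (low + high) 2) with
    | none => none  -- unreachable in A's calls: 0 ≤ low ≤ mid ≤ high < len lst
    | some d =>
      if title == pyTitle d then some d
      else if pyTitle d < title then
        vidLoopA lst title (PySem.Int.floordiv (low + high) 2 + 1) high (num_checks + 1)
      else vidLoopA lst title low (PySem.Int.floordiv (low + high) 2 - 1) (num_checks + 1)
  else none
termination_by (high + 1 - low).toNat
decreasing_by
  · have h1 := (PySem.Int.le_floordiv_iff_mul_le (a := low + high) (b := 2) (q := low) (by norm_num)).mpr (by omega)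
    have h2 := (PySem.Int.floordiv_lt_iff_lt_mul (a := low + high) (b := 2) (q := high + 1) (by norm_num)).mpr (by omega)
    omega
  · have h1 := (PySem.Int.le_floordiv_iff_mul_le (a := low + high) (b := 2) (q := low) (by norm_num)).mpr (by omega)
    have h2 := (PySem.Int.floordiv_lt_iff_lt_mul (a := low + high) (b := 2) (q := high + 1) (by norm_num)).mpr (by omega)
    omega

def vid_search (lst : List (List (String × String))) (title : String) :
    Option (List (String × String)) :=
  let s := PySem.List.sorted lst pyTitle
  vidLoopA s title 0 ((s.length : Int) - 1) 0

-- ===== PORT B =====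
-- Source B's recursive helper search(lo, n): window of n elements starting at offset lo
def vidSearchB (lst : List (List (String × String))) (title : String)
    (lo n : Nat) : Option (List (String × String)) :=
  if n = 0 then none
  else
    match lst[(lo + (n - 1) / 2)]? with   -- lst[mid], index always ≥ 0 here, = Python's lst[mid]
    | none => none  -- unreachable in B's calls: mid < len lst
    | some d =>
      if title == pyTitle d then some d
      else if pyTitle d < title then
        vidSearchB lst title (lo + (n - 1) / 2 + 1) (lo + n - 1 - (lo + (n - 1) / 2))
      else vidSearchB lst title lo ((lo + (n - 1) / 2) - lo)
termination_by n
decreasing_by all_goals omega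

def vid_search_alt (lst : List (List (String × String))) (title : String) :
    Option (List (String × String)) :=
  let s := PySem.List.sorted lst pyTitle
  vidSearchB s title 0 s.length

-- ===== PRECONDITION & SPEC =====
-- Pre_ excludes exactly the inputs where some element lacks the key "title": there
-- Python A raises KeyError (in the sort or the lookup), and B raises too.
def Pre_vid_search (lst : List (List (String × String))) (title : String) : Prop :=
  (lst.all (fun d => d.any (fun p => p.1 == "title"))) = true
instance (lst : List (List (String × String))) (title : String) : Decidable (Pre_vid_search lst title) := by unfold Pre_vid_search; infer_instance

def pvWitness_vid_search : (List (List (String × String))) × String :=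
  ([[("title", "b")], [("title", "a")]], "a")

def Spec_vid_search (lst : List (List (String × String))) (title : String) (out : Option (List (String × String))) : Prop := out = vid_search_alt lst title
instance (lst : List (List (String × String))) (title : String) (out : Option (List (String × String))) : Decidable (Spec_vid_search lst title out) := by unfold Spec_vid_search; infer_instance

-- ===== CLAIM (what is proved, stated in full; the proofs are below) =====
def Claim_equal_vid_search : Prop := ∀ (lst : List (List (String × String))) (title : String), Dom_vid_search lst title → Pre_vid_search lst title → Spec_vid_search lst title (vid_search lst title)

-- ===== LEMMAS AND PROOFS =====

-- the loop of A equals the recursion of B: low = lo, high = lo + n - 1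
lemma vidLoopA_eq_vidSearchB (lst : List (List (String × String))) (title : String) :
    ∀ (n lo : Nat) (nc : Int),
      vidLoopA lst title (lo : Int) ((lo : Int) + (n : Int) - 1) nc =
        vidSearchB lst title lo n := by
  intro n
  induction n using Nat.strong_induction_on with
  | _ n ih =>
    intro lo nc
    rw [vidLoopA, vidSearchB]
    by_cases hn : n = 0
    · subst hn
      rw [dif_neg (by push_cast; omega), if_pos rfl]
    · rw [dif_pos (by omega : (lo : Int) ≤ (lo : Int) + (n : Int) - 1), if_neg hn]
      have hmid : PySem.Int.floordiv ((lo : Int) + ((lo : Int) + (n : Int) - 1)) 2 =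
          ((lo + (n - 1) / 2 : Nat) : Int) := by
        have h1 := (PySem.Int.le_floordiv_iff_mul_le
          (a := (lo : Int) + ((lo : Int) + (n : Int) - 1)) (b := 2)
          (q := ((lo + (n - 1) / 2 : Nat) : Int)) (by norm_num)).mpr (by push_cast; omega)
        have h2 := (PySem.Int.floordiv_lt_iff_lt_mul
          (a := (lo : Int) + ((lo : Int) + (n : Int) - 1)) (b := 2)
          (q := ((lo + (n - 1) / 2 : Nat) : Int) + 1) (by norm_num)).mpr (by push_cast; omega)
        omega
      rw [hmid, PySem.List.pyGet?_natCast]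
      cases hd : lst[(lo + (n - 1) / 2)]? with
      | none => rfl
      | some d =>
        dsimp only
        by_cases he : title == pyTitle d
        · rw [if_pos he, if_pos he]
        · rw [if_neg he, if_neg he]
          by_cases hlt : pyTitle d < title
          · rw [if_pos hlt, if_pos hlt]
            have := ih (lo + n - 1 - (lo + (n - 1) / 2)) (by omega)
              (lo + (n - 1) / 2 + 1) (nc + 1)
            rw [← this]
            congr 1 <;> push_cast <;> omega
          · rw [if_neg hlt, if_neg hlt]
            have := ih ((lo + (n - 1) / 2) - lo) (by omega) lo (nc + 1)
            rw [← this]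
            congr 1
            push_cast; omega

-- ===== VERDICT (by name: the statement is the Claim_ definition above) =====
theorem vid_search_spec : Claim_equal_vid_search := by
  intro lst title _ _
  unfold Spec_vid_search vid_search vid_search_alt
  have := vidLoopA_eq_vidSearchB (PySem.List.sorted lst pyTitle) title
    (PySem.List.sorted lst pyTitle).length 0 0
  simpa using this
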